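-- pv_equiv track=rewrite | github.com/youth4ever/orion | Project EULER/pb126 Cuboid layers.py | get_cuboid_layers
-- ===== SOURCE A (Python) =====
-- def get_cuboid_layers( cuboid, k_th ) :
--     a, b, c = cuboid
--     L =[]
--     l1 = 2*(a*b) + 2*(a*c) + 2*(b*c)
--     for k in range(0, k_th+1):
--         l_th = l1 + 4*(a+b+c)*k + 8* ((k-1)*k//2)
--         L.append(l_th)
--
--     return L
-- ===== SOURCE B (Python) =====
-- def get_cuboid_layers(cuboid, k_th):
--     a, b, c = cuboid
--     s = a + b + c
--     cur = 2 * (a*b + a*c + b*c)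
--     L = []
--     k = 0
--     while k <= k_th:
--         L.append(cur)
--         cur += 4*s + 8*k
--         k += 1
--     return L
-- ===== Notes on version B (the rewrite author's own statement) =====
-- stated objective: alternative
-- what changed: B replaces the per-index closed-form evaluation (with its multiplication by k and //2 triangular-number floor division) by an incremental while-loop that maintains a running layer value and adds the first difference 4*(a+b+c)+8*k each step.
import Mathlib
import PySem

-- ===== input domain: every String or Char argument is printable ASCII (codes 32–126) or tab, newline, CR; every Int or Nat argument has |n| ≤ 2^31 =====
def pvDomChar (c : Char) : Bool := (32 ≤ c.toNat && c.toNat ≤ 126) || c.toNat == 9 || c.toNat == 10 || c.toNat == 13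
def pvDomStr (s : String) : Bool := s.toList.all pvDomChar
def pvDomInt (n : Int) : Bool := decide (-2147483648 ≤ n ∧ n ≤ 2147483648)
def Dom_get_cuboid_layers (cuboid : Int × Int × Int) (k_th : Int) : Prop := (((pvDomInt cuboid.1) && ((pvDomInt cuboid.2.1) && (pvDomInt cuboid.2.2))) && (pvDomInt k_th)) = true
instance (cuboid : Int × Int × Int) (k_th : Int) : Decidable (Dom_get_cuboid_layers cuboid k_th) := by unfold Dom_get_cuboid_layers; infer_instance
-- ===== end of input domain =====

-- B computes the same layer list incrementally (running value + first difference 4*(a+b+c)+8*k)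
-- instead of evaluating A's closed form with its floor division at every index; alternative, same cost.

-- ===== PORT A =====
def get_cuboid_layers (cuboid : Int × Int × Int) (k_th : Int) : List Int :=
  let a := cuboid.1
  let b := cuboid.2.1
  let c := cuboid.2.2
  let l1 := 2*(a*b) + 2*(a*c) + 2*(b*c)
  (PySem.List.pyRange 0 (k_th + 1) 1).foldl
    (fun L k => L ++ [l1 + 4*(a+b+c)*k + 8 * PySem.Int.floordiv ((k-1)*k) 2]) []

-- ===== PORT B =====
-- the while-loop of Source B: n remaining iterations, k the loop counter, cur the running layer value
def pvAltLoop (s : Int) : Nat → Int → Int → List Int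
  | 0, _, _ => []
  | n+1, k, cur => cur :: pvAltLoop s n (k+1) (cur + 4*s + 8*k)

def get_cuboid_layers_alt (cuboid : Int × Int × Int) (k_th : Int) : List Int :=
  let a := cuboid.1
  let b := cuboid.2.1
  let c := cuboid.2.2
  let s := a + b + c
  let cur := 2 * (a*b + a*c + b*c)
  pvAltLoop s (k_th + 1).toNat 0 cur

-- ===== PRECONDITION & SPEC =====
def Spec_get_cuboid_layers (cuboid : Int × Int × Int) (k_th : Int) (out : List Int) : Prop := out = get_cuboid_layers_alt cuboid k_th
instance (cuboid : Int × Int × Int) (k_th : Int) (out : List Int) : Decidable (Spec_get_cuboid_layers cuboid k_th out) := by unfold Spec_get_cuboid_layers; infer_instance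

-- ===== CLAIM (what is proved, stated in full; the proofs are below) =====
def Claim_equal_get_cuboid_layers : Prop := ∀ (cuboid : Int × Int × Int) (k_th : Int), Dom_get_cuboid_layers cuboid k_th → Spec_get_cuboid_layers cuboid k_th (get_cuboid_layers cuboid k_th)

-- ===== LEMMAS AND PROOFS =====

-- A's closed form for layer k
def pvF (s l1 k : Int) : Int := l1 + 4*s*k + 8 * PySem.Int.floordiv ((k-1)*k) 2

-- first difference of the closed form: pvF (k+1) = pvF k + 4*s + 8*k
theorem pvF_succ (s l1 k : Int) : pvF s l1 (k+1) = pvF s l1 k + 4*s + 8*k := by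
  obtain ⟨m, hm⟩ : Even ((k-1)*k) := by
    have := Int.even_mul_succ_self (k-1)
    simpa using this
  obtain ⟨m', hm'⟩ : Even ((k+1-1)*(k+1)) := by
    have := Int.even_mul_succ_self k
    simpa using this
  have h1 : PySem.Int.floordiv ((k-1)*k) 2 = m := by
    rw [PySem.Int.floordiv_eq_ediv_of_pos (by norm_num), hm]
    have : m + m = 2 * m := by ring
    rw [this, Int.mul_ediv_cancel_left m (by norm_num)]
  have h2 : PySem.Int.floordiv ((k+1-1)*(k+1)) 2 = m' := by
    rw [PySem.Int.floordiv_eq_ediv_of_pos (by norm_num), hm']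
    have : m' + m' = 2 * m' := by ring
    rw [this, Int.mul_ediv_cancel_left m' (by norm_num)]
  unfold pvF
  rw [h1, h2]
  have hm2 : 2 * m = (k-1)*k := by omega
  have hm2' : 2 * m' = k*(k+1) := by rw [show k*(k+1) = (k+1-1)*(k+1) by ring]; omega
  linear_combination 4 * hm2' - 4 * hm2

-- B's loop produces exactly the closed-form values pvF s l1 k, k, k+1, …, for n iterations
theorem pvAltLoop_eq_map (s l1 : Int) : ∀ (n : Nat) (k : Int),
    pvAltLoop s n k (pvF s l1 k) = (PySem.List.pyRange k (k + n) 1).map (pvF s l1) := by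
  intro n
  induction n with
  | zero =>
    intro k
    rw [PySem.List.pyRange_one_eq_nil (by simp : k + ((0:Nat):Int) ≤ k)]; simp [pvAltLoop]
  | succ n ih =>
    intro k
    rw [PySem.List.pyRange_one_cons (by push_cast; omega : k < k + ((n+1 : Nat) : Int))]
    have hrec : pvAltLoop s n (k+1) (pvF s l1 k + 4*s + 8*k)
        = (PySem.List.pyRange (k+1) (k+1+n) 1).map (pvF s l1) := by
      rw [← pvF_succ s l1 k]; exact ih (k+1)
    simp only [pvAltLoop, List.map_cons, hrec]
    have hend : k + ((n+1 : Nat) : Int) = k + 1 + (n : Nat) := by push_cast; ring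
    rw [hend]

-- ===== VERDICT (by name: the statement is the Claim_ definition above) =====
theorem get_cuboid_layers_spec : Claim_equal_get_cuboid_layers := by
  intro cuboid k_th _
  unfold Spec_get_cuboid_layers get_cuboid_layers get_cuboid_layers_alt
  obtain ⟨a, b, c⟩ := cuboid
  simp only
  rw [PySem.List.foldl_append_singleton_eq_map, List.nil_append]
  have hf : (fun k => 2*(a*b) + 2*(a*c) + 2*(b*c) + 4*(a+b+c)*k + 8 * PySem.Int.floordiv ((k-1)*k) 2)
      = pvF (a+b+c) (2*(a*b) + 2*(a*c) + 2*(b*c)) := by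
    funext k; unfold pvF; ring_nf
  have hcur : (2 : Int) * (a*b + a*c + b*c) = pvF (a+b+c) (2*(a*b) + 2*(a*c) + 2*(b*c)) 0 := by
    norm_num [pvF, PySem.Int.floordiv]
    ring
  rw [hf, hcur, pvAltLoop_eq_map (a+b+c) (2*(a*b) + 2*(a*c) + 2*(b*c)) (k_th+1).toNat 0]
  by_cases h : 0 ≤ k_th + 1
  · rw [show (0:Int) + ((k_th+1).toNat : Int) = k_th + 1 from by omega]
  · rw [PySem.List.pyRange_one_eq_nil (by omega),
        PySem.List.pyRange_one_eq_nil (by omega : (0:Int) + ((k_th+1).toNat : Int) ≤ 0)]
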